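-- pv_equiv track=rewrite | github.com/reikland/JohnBashTopic | generation.py | split_topic_blocks
-- ===== SOURCE A (Python) =====
-- from typing import Dict, List, Optional
--
-- def split_topic_blocks(raw_text: str) -> List[str]:
--     t = (raw_text or "").replace("\r\n", "\n").strip()
--     parts: List[str] = []
--     buf: List[str] = []
--     for ln in t.split("\n"):
--         if ln.strip() == "---":
--             block = "\n".join(buf).strip()
--             if block:
--                 parts.append(block)
--             buf = []
--         else:
--             buf.append(ln)
--     tail = "\n".join(buf).strip()
--     if tail:
--         parts.append(tail)
--
--     parts = [p for p in parts if "TITLE:" in p and "DOMAIN:" in p and "SUMMARY:" in p]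
--     return parts
-- ===== SOURCE B (Python) =====
-- from typing import List
--
--
-- def split_topic_blocks(raw_text: str) -> List[str]:
--     t = (raw_text or "").replace("\r\n", "\n").strip()
--     lines = t.split("\n")
--     d = [i for i, ln in enumerate(lines) if ln.strip() == "---"]
--     starts = [0] + [i + 1 for i in d]
--     stops = d + [len(lines)]
--     segs = ["\n".join(lines[a:b]).strip() for a, b in zip(starts, stops)]
--     return [s for s in segs
--             if "TITLE:" in s and "DOMAIN:" in s and "SUMMARY:" in s]
-- ===== Notes on version B (the rewrite author's own statement) =====
-- stated objective: alternative
-- what changed: Replaced the line-by-line accumulator loop (buffer flushed at each '---' line) by a split-then-filter pipeline: compute the delimiter line indices once, slice the line list between consecutive cut points, and filter the joined, stripped segments.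
import Mathlib
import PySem

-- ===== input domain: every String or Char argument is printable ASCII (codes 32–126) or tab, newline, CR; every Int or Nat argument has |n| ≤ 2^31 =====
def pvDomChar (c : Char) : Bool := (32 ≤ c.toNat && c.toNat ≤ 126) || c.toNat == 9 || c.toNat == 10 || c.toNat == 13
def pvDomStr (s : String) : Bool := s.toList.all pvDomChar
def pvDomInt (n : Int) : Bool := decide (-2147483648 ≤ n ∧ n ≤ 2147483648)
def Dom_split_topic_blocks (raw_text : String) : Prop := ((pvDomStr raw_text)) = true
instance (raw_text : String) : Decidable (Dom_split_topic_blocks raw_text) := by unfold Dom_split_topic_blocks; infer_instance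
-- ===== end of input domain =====

-- B replaces A's accumulator loop by a cut-points-then-slice pipeline (alternative decomposition, same cost).

-- ===== PORT A =====
-- t.split("\n"): sep is the nonempty literal "\n", so Python never raises; split? is always `some` here.
def split_topic_blocks (raw_text : String) : List String :=
  let t := PySem.Str.strip (PySem.Str.replace raw_text "\r\n" "\n")
  let st := ((PySem.Str.split? t "\n").getD []).foldl
    (fun (acc : List String × List String) ln =>
      if PySem.Str.strip ln == "---" then
        let block := PySem.Str.strip (PySem.Str.join "\n" acc.2)
        (if block ≠ "" then acc.1 ++ [block] else acc.1, [])
      else (acc.1, acc.2 ++ [ln])) ([], [])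
  let tail := PySem.Str.strip (PySem.Str.join "\n" st.2)
  let parts := if tail ≠ "" then st.1 ++ [tail] else st.1
  parts.filter (fun p =>
    PySem.Str.isIn "TITLE:" p && PySem.Str.isIn "DOMAIN:" p && PySem.Str.isIn "SUMMARY:" p)

-- ===== PORT B =====
def split_topic_blocks_alt (raw_text : String) : List String :=
  let t := PySem.Str.strip (PySem.Str.replace raw_text "\r\n" "\n")
  let lines := (PySem.Str.split? t "\n").getD []
  let d : List Int :=
    ((PySem.List.enumerate lines 0).filter (fun q => PySem.Str.strip q.2 == "---")).map (·.1)
  let starts : List Int := 0 :: d.map (· + 1)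
  let stops : List Int := d ++ [PySem.List.len lines]
  let segs := (starts.zip stops).map (fun ab =>
    PySem.Str.strip (PySem.Str.join "\n" (PySem.List.slice lines (some ab.1) (some ab.2))))
  segs.filter (fun s =>
    PySem.Str.isIn "TITLE:" s && PySem.Str.isIn "DOMAIN:" s && PySem.Str.isIn "SUMMARY:" s)

-- ===== PRECONDITION & SPEC =====
def Spec_split_topic_blocks (raw_text : String) (out : List String) : Prop := out = split_topic_blocks_alt raw_text
instance (raw_text : String) (out : List String) : Decidable (Spec_split_topic_blocks raw_text out) := by unfold Spec_split_topic_blocks; infer_instance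

-- ===== CLAIM (what is proved, stated in full; the proofs are below) =====
def Claim_equal_split_topic_blocks : Prop := ∀ (raw_text : String), Dom_split_topic_blocks raw_text → Spec_split_topic_blocks raw_text (split_topic_blocks raw_text)

-- ===== LEMMAS AND PROOFS =====

-- delimiter test, block formatter, keep test (names for the ports' shared pieces)
def pvP (ln : String) : Bool := PySem.Str.strip ln == "---"
def pvBlk (c : List String) : String := PySem.Str.strip (PySem.Str.join "\n" c)
def pvKeep (s : String) : Bool :=
  PySem.Str.isIn "TITLE:" s && PySem.Str.isIn "DOMAIN:" s && PySem.Str.isIn "SUMMARY:" s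

def pvStep (acc : List String × List String) (ln : String) : List String × List String :=
  if PySem.Str.strip ln == "---" then
    let block := PySem.Str.strip (PySem.Str.join "\n" acc.2)
    (if block ≠ "" then acc.1 ++ [block] else acc.1, [])
  else (acc.1, acc.2 ++ [ln])

-- canonical "split the line list at delimiter lines" (proof-side middleman)
def pvChunks (lines : List String) : List (List String) :=
  match lines with
  | [] => [[]]
  | ln :: rest => if pvP ln then [] :: pvChunks rest else (pvChunks rest).modifyHead (ln :: ·)

-- Nat-level delimiter indices
def pvIdx (lines : List String) : List Nat :=
  match lines with
  | [] => []
  | ln :: rest => (if pvP ln then [0] else []) ++ (pvIdx rest).map (· + 1)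

theorem pvChunks_no_match (xs : List String) (h : ∀ l ∈ xs, pvP l = false) :
    pvChunks xs = [xs] := by
  induction xs with
  | nil => rfl
  | cons a l ih =>
    have ha : pvP a = false := h a (by simp)
    simp [pvChunks, ha, ih (fun x hx => h x (by simp [hx]))]

theorem pvChunks_append_delim (buf : List String) (ln : String) (rest : List String)
    (hbuf : ∀ l ∈ buf, pvP l = false) (hln : pvP ln = true) :
    pvChunks (buf ++ ln :: rest) = buf :: pvChunks rest := by
  induction buf with
  | nil => simp [pvChunks, hln]
  | cons b bs ih =>
    have hb : pvP b = false := hbuf b (by simp)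
    have h2 := ih (fun x hx => hbuf x (by simp [hx]))
    simp [pvChunks, hb, h2, List.modifyHead]

-- A-side: the fold with (parts, buf) accumulator produces the nonempty stripped blocks
theorem pvA_fold (lines : List String) : ∀ (parts buf : List String),
    (∀ l ∈ buf, pvP l = false) →
    (if pvBlk (lines.foldl pvStep (parts, buf)).2 ≠ "" then
        (lines.foldl pvStep (parts, buf)).1 ++ [pvBlk (lines.foldl pvStep (parts, buf)).2]
      else (lines.foldl pvStep (parts, buf)).1) =
      parts ++ ((pvChunks (buf ++ lines)).map pvBlk).filter (fun s => s ≠ "") := by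
  induction lines with
  | nil =>
    intro parts buf hbuf
    rw [List.append_nil, pvChunks_no_match buf hbuf]
    simp only [List.foldl_nil, List.map_cons, List.map_nil, List.filter]
    split_ifs with hb <;> simp_all
  | cons ln rest ih =>
    intro parts buf hbuf
    rw [List.foldl_cons]
    by_cases hp : pvP ln = true
    · have hp2 : (PySem.Str.strip ln == "---") = true := hp
      have hstep : pvStep (parts, buf) ln =
          (if pvBlk buf ≠ "" then parts ++ [pvBlk buf] else parts, []) := by
        simp [pvStep, hp2, pvBlk]
      rw [hstep, ih _ [] (by simp), pvChunks_append_delim buf ln rest hbuf hp]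
      by_cases hb : pvBlk buf = ""
      · simp [hb]
      · simp [hb, List.append_assoc]
    · have hp2 : (PySem.Str.strip ln == "---") = false := by simpa [pvP] using hp
      have hstep : pvStep (parts, buf) ln = (parts, buf ++ [ln]) := by
        simp [pvStep, hp2]
      have hbuf' : ∀ l ∈ buf ++ [ln], pvP l = false := by
        intro l hl
        rcases List.mem_append.mp hl with h | h
        · exact hbuf l h
        · simp at h; subst h; exact hp2
      rw [hstep, ih _ (buf ++ [ln]) hbuf']
      simp [List.append_assoc]

-- B-side: the enumerate/filter/map cut list is pvIdx, shifted by the start offset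
theorem pvIdx_enum (lines : List String) : ∀ (s : Int),
    ((PySem.List.enumerate lines s).filter (fun q => PySem.Str.strip q.2 == "---")).map (·.1) =
      (pvIdx lines).map (fun (k : Nat) => s + (k : Int)) := by
  induction lines with
  | nil => intro s; simp [PySem.List.enumerate_nil, pvIdx]
  | cons ln rest ih =>
    intro s
    rw [PySem.List.enumerate_cons]
    cases hp : (PySem.Str.strip ln == "---") with
    | true =>
      rw [List.filter_cons_of_pos (by simpa using hp),
        show pvIdx (ln :: rest) = 0 :: (pvIdx rest).map (· + 1) from by simp [pvIdx, pvP, hp],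
        List.map_cons, List.map_cons, ih (s + 1), List.map_map]
      refine congrArg₂ _ (by simp) ?_
      apply List.map_congr_left
      intro k _
      simp only [Function.comp_apply]
      push_cast
      ring
    | false =>
      rw [List.filter_cons_of_neg (by simpa using hp),
        show pvIdx (ln :: rest) = (pvIdx rest).map (· + 1) from by simp [pvIdx, pvP, hp],
        ih (s + 1), List.map_map]
      apply List.map_congr_left
      intro k _
      simp only [Function.comp_apply]
      push_cast
      ring

-- B-side: slicing between consecutive cut points is exactly pvChunks
theorem pvB_slices (lines : List String) :
    (((0 :: (pvIdx lines).map (· + 1)).zip (pvIdx lines ++ [lines.length])).map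
      (fun ab => (lines.drop ab.1).take (ab.2 - ab.1))) = pvChunks lines := by
  induction lines with
  | nil => simp [pvIdx, pvChunks]
  | cons ln rest ih =>
    rcases hSex : pvIdx rest ++ [rest.length] with _ | ⟨t0, ts⟩
    · exact absurd hSex (by simp)
    by_cases hp : pvP ln = true
    · have h1 : pvIdx (ln :: rest) = 0 :: (pvIdx rest).map (· + 1) := by
        simp [pvIdx, hp]
      have hstops : pvIdx (ln :: rest) ++ [(ln :: rest).length] =
          0 :: (pvIdx rest ++ [rest.length]).map (· + 1) := by
        rw [h1, List.length_cons]
        simp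
      rw [hstops, h1,
        show pvChunks (ln :: rest) = [] :: pvChunks rest from by simp [pvChunks, hp],
        List.zip_cons_cons, List.map_cons, List.zip_map, List.map_map]
      refine congrArg₂ _ (by simp) ?_
      rw [← ih]
      apply List.map_congr_left
      intro ab _
      simp only [Function.comp_apply, Prod.map_fst, Prod.map_snd]
      rw [List.drop_succ_cons, Nat.add_sub_add_right]
    · have hp2 : pvP ln = false := by simpa using hp
      have h1 : pvIdx (ln :: rest) = (pvIdx rest).map (· + 1) := by
        simp [pvIdx, hp2]
      have hstops : pvIdx (ln :: rest) ++ [(ln :: rest).length] =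
          (t0 + 1) :: ts.map (· + 1) := by
        rw [h1, List.length_cons,
          show (t0 + 1) :: ts.map (· + 1) = (t0 :: ts).map (· + 1) from rfl, ← hSex]
        simp
      have ih2 := ih
      rw [hSex, List.zip_cons_cons, List.map_cons] at ih2
      rw [hstops, h1,
        show pvChunks (ln :: rest) = (pvChunks rest).modifyHead (ln :: ·) from by
          simp [pvChunks, hp2],
        ← ih2, List.modifyHead_cons,
        List.zip_cons_cons, List.map_cons, List.zip_map, List.map_map]
      refine congrArg₂ _ ?_ ?_
      · simp [List.take_succ_cons]
      · apply List.map_congr_left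
        intro ab _
        simp only [Function.comp_apply, Prod.map_fst, Prod.map_snd]
        rw [List.drop_succ_cons, Nat.add_sub_add_right]

theorem pvKeep_empty : pvKeep "" = false := by decide

-- dropping empty blocks first does not change the kept blocks ("" never contains "TITLE:")
theorem pvFilter_keep_ne (l : List String) :
    (l.filter (fun s => s ≠ "")).filter pvKeep = l.filter pvKeep := by
  rw [List.filter_filter]
  apply List.filter_congr
  intro x _
  by_cases hx : x = ""
  · subst hx; simp [pvKeep_empty]
  · simp [hx]

-- the whole pipeline, for an arbitrary line list
theorem pvMain (lines : List String) :
    (if pvBlk (lines.foldl pvStep (([] : List String), ([] : List String))).2 ≠ "" then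
        (lines.foldl pvStep ([], [])).1 ++ [pvBlk (lines.foldl pvStep ([], [])).2]
      else (lines.foldl pvStep ([], [])).1).filter pvKeep =
    (((0 :: (((PySem.List.enumerate lines 0).filter
          (fun q => PySem.Str.strip q.2 == "---")).map (·.1)).map (· + 1)).zip
        ((((PySem.List.enumerate lines 0).filter
          (fun q => PySem.Str.strip q.2 == "---")).map (·.1)) ++ [PySem.List.len lines])).map
      (fun ab => pvBlk (PySem.List.slice lines (some ab.1) (some ab.2)))).filter pvKeep := by
  have hd : ((PySem.List.enumerate lines 0).filter
      (fun q => PySem.Str.strip q.2 == "---")).map (·.1) =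
      (pvIdx lines).map (Nat.cast : Nat → Int) := by
    rw [pvIdx_enum lines 0]
    apply List.map_congr_left
    intro k _
    simp
  have hstarts : (0 : Int) :: ((pvIdx lines).map (Nat.cast : Nat → Int)).map (· + 1) =
      (0 :: (pvIdx lines).map (· + 1)).map (Nat.cast : Nat → Int) := by
    simp only [List.map_cons, Nat.cast_zero, List.map_map]
    refine congrArg₂ _ rfl ?_
    apply List.map_congr_left
    intro k _
    simp
  have hstops : ((pvIdx lines).map (Nat.cast : Nat → Int)) ++ [PySem.List.len lines] =
      (pvIdx lines ++ [lines.length]).map (Nat.cast : Nat → Int) := by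
    simp [PySem.List.len_eq]
  rw [pvA_fold lines [] [] (by simp), List.nil_append, List.nil_append, pvFilter_keep_ne,
    hd, hstarts, hstops, List.zip_map, List.map_map]
  refine congrArg (List.filter pvKeep) ?_
  rw [← pvB_slices lines, List.map_map]
  apply List.map_congr_left
  intro ab _
  simp only [Function.comp_apply, Prod.map_fst, Prod.map_snd]
  rw [PySem.List.slice_natCast]

-- ===== VERDICT (by name: the statement is the Claim_ definition above) =====
theorem split_topic_blocks_spec : Claim_equal_split_topic_blocks := by
  intro raw_text _
  show split_topic_blocks raw_text = split_topic_blocks_alt raw_text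
  exact pvMain ((PySem.Str.split? (PySem.Str.strip (PySem.Str.replace raw_text "\r\n" "\n")) "\n").getD [])
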